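-- pv_equiv track=rewrite | github.com/VarnasriKumaran/leetcode | 3995-gcd-of-odd-and-even-sums/gcd-of-odd-and-even-sums.py | gcdOfOddEvenSums
-- ===== SOURCE A (Python) =====
-- def gcdOfOddEvenSums(n: int) -> int:
--     max_len=n*2
--     even_sum=0
--     odd_sum=0
--
--     for i in range(1,max_len):
--         if i%2==0:
--             even_sum+=i
--         else:
--             odd_sum+=i
--
--     while(odd_sum!=0):
--         even_sum,odd_sum=odd_sum,even_sum%odd_sum
--     return even_sum
-- ===== SOURCE B (Python) =====
-- def gcdOfOddEvenSums(n: int) -> int: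
--     # closed-form sums: 1+3+...+(2n-1) = n*n ; 2+4+...+(2n-2) = n*(n-1)
--     if n < 1:
--         return 0
--     even, odd = n * (n - 1), n * n
--     while odd != 0:
--         even, odd = odd, even % odd
--     return even
-- ===== Notes on version B (the rewrite author's own statement) =====
-- stated objective: faster
-- what changed: Replaces the O(n) summation loop over range(1,2n) with closed-form arithmetic-series formulas (odd sum = n*n, even sum = n*(n-1)) followed by the same Euclidean gcd.
import Mathlib
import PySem

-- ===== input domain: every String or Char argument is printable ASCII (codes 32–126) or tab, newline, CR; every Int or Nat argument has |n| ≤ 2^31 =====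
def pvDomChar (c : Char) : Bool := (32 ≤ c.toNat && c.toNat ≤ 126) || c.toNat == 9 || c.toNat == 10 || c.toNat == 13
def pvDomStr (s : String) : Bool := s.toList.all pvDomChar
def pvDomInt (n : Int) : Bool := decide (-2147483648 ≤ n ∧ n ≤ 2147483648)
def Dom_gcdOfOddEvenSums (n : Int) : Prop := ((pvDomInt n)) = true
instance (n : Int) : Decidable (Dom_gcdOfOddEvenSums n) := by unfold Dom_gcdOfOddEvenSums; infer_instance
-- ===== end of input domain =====

-- B: closed-form arithmetic-series sums (odd = n*n, even = n*(n-1)) replace A's O(n) summation loop; measured faster.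
-- ===== PORT A =====
-- B changes only the computation of the two sums (closed form instead of the O(n) loop);
-- the Euclidean while-loop is the same in both sources, so both ports use a euclid helper.

-- termination fact for Python's `while odd != 0: even, odd = odd, even % odd`
theorem pvModNatAbsLt (a b : Int) (h : b ≠ 0) : (PySem.Int.mod a b).natAbs < b.natAbs := by
  rcases lt_trichotomy b 0 with hb | hb | hb
  · have := PySem.Int.mod_neg_bounds a hb
    omega
  · exact absurd hb h
  · have h1 := PySem.Int.mod_nonneg a hb
    have h2 := PySem.Int.mod_lt a hb
    omega

-- the `while(odd_sum!=0)` loop of A (Python source line for line)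
def euclidA (even odd : Int) : Int :=
  if h : odd ≠ 0 then euclidA odd (PySem.Int.mod even odd) else even
termination_by odd.natAbs
decreasing_by exact pvModNatAbsLt even odd h

def gcdOfOddEvenSums (n : Int) : Int :=
  let max_len := n * 2
  let s := (PySem.List.pyRange 1 max_len 1).foldl
    (fun (acc : Int × Int) i =>
      if PySem.Int.mod i 2 = 0 then (acc.1 + i, acc.2) else (acc.1, acc.2 + i))
    ((0 : Int), (0 : Int))
  euclidA s.1 s.2

-- ===== PORT B =====
-- the `while odd != 0` loop of B (identical in the Python source of B)
def euclidB (even odd : Int) : Int :=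
  if h : odd ≠ 0 then euclidB odd (PySem.Int.mod even odd) else even
termination_by odd.natAbs
decreasing_by exact pvModNatAbsLt even odd h

def gcdOfOddEvenSums_alt (n : Int) : Int :=
  if n < 1 then 0 else euclidB (n * (n - 1)) (n * n)

-- ===== PRECONDITION & SPEC =====
def Spec_gcdOfOddEvenSums (n : Int) (out : Int) : Prop := out = gcdOfOddEvenSums_alt n
instance (n : Int) (out : Int) : Decidable (Spec_gcdOfOddEvenSums n out) := by unfold Spec_gcdOfOddEvenSums; infer_instance

-- ===== CLAIM (what is proved, stated in full; the proofs are below) =====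
def Claim_equal_gcdOfOddEvenSums : Prop := ∀ (n : Int), Dom_gcdOfOddEvenSums n → Spec_gcdOfOddEvenSums n (gcdOfOddEvenSums n)

-- ===== LEMMAS AND PROOFS =====

theorem euclid_eq (even odd : Int) : euclidA even odd = euclidB even odd := by
  rw [euclidA, euclidB]
  split_ifs with h
  · exact euclid_eq odd (PySem.Int.mod even odd)
  · rfl
termination_by odd.natAbs
decreasing_by exact pvModNatAbsLt even odd h

-- the summation loop of A, in closed form
theorem sum_loop_eq (n : Int) (hn : 1 ≤ n) :
    (PySem.List.pyRange 1 (n * 2) 1).foldl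
      (fun (acc : Int × Int) i =>
        if PySem.Int.mod i 2 = 0 then (acc.1 + i, acc.2) else (acc.1, acc.2 + i))
      ((0 : Int), (0 : Int)) = (n * (n - 1), n * n) := by
  induction n, hn using Int.le_induction with
  | base => decide
  | succ m hm ih =>
    have hsplit : PySem.List.pyRange 1 ((m + 1) * 2) 1
        = PySem.List.pyRange 1 (m * 2) 1 ++ PySem.List.pyRange (m * 2) (m * 2 + 2) 1 := by
      have : (m + 1) * 2 = m * 2 + 2 := by ring
      rw [this]
      exact PySem.List.pyRange_one_append 1 (m * 2) (m * 2 + 2) (by omega) (by omega)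
    have htwo : PySem.List.pyRange (m * 2) (m * 2 + 2) 1 = [m * 2, m * 2 + 1] := by
      rw [PySem.List.pyRange_one_cons (by omega), PySem.List.pyRange_one_cons (by omega),
        PySem.List.pyRange_one_eq_nil (by omega)]
    have he : PySem.Int.mod (m * 2) 2 = 0 := by
      rw [PySem.Int.mod_eq_zero_iff_dvd]; exact ⟨m, by ring⟩
    have ho : ¬ PySem.Int.mod (m * 2 + 1) 2 = 0 := by
      rw [PySem.Int.mod_eq_zero_iff_dvd]
      rintro ⟨k, hk⟩; omega
    rw [hsplit, List.foldl_append, ih, htwo]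
    simp only [List.foldl, if_pos he, if_neg ho]
    rw [Prod.mk.injEq]
    constructor <;> ring

-- ===== VERDICT (by name: the statement is the Claim_ definition above) =====
theorem gcdOfOddEvenSums_spec : Claim_equal_gcdOfOddEvenSums := by
  intro n _
  unfold Spec_gcdOfOddEvenSums gcdOfOddEvenSums gcdOfOddEvenSums_alt
  by_cases hn : n < 1
  · rw [if_pos hn]
    show euclidA ((PySem.List.pyRange 1 (n * 2) 1).foldl
      (fun (acc : Int × Int) i =>
        if PySem.Int.mod i 2 = 0 then (acc.1 + i, acc.2) else (acc.1, acc.2 + i))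
      ((0 : Int), (0 : Int))).1 _ = 0
    rw [PySem.List.pyRange_one_eq_nil (by omega)]
    simp only [List.foldl]
    rw [euclidA]
    simp
  · rw [if_neg hn]
    show euclidA ((PySem.List.pyRange 1 (n * 2) 1).foldl
      (fun (acc : Int × Int) i =>
        if PySem.Int.mod i 2 = 0 then (acc.1 + i, acc.2) else (acc.1, acc.2 + i))
      ((0 : Int), (0 : Int))).1 _ = euclidB (n * (n - 1)) (n * n)
    rw [sum_loop_eq n (by omega)]
    exact euclid_eq _ _
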